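-- pv_equiv track=rewrite | github.com/Yaroslav-K-V/Unitra | src/application/workspace_services.py | _extract_relevant_traceback
-- ===== SOURCE A (Python) =====
-- from typing import Any, List, Optional
--
-- def _extract_relevant_traceback(run_output: str, failure_tests: List[str]) -> str:
--     if not run_output:
--         return ""
--     lines = run_output.splitlines()
--     wanted = set(failure_tests)
--     if not wanted:
--         return "\n".join(lines[-80:])
--     captured = []
--     capture = False
--     for line in lines:
--         if any(test_name in line for test_name in wanted):
--             capture = True
--         if capture:
--             captured.append(line)
--         if capture and line.startswith("FAILED ") and captured:
--             break
--         if len(captured) >= 120: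
--             break
--     return "\n".join(captured or lines[-80:])
-- ===== SOURCE B (Python) =====
-- def _extract_relevant_traceback(run_output, failure_tests):
--     lines = run_output.splitlines()
--     # token-major search: for each wanted name, its first line index; anchor = running minimum.
--     # Each scan is pruned at the current minimum: a later hit cannot improve it.
--     best = None
--     for t in set(failure_tests):
--         limit = len(lines) if best is None else best
--         for i in range(limit):
--             if t in lines[i]:
--                 best = i
--                 break
--     if best is None:
--         return "\n".join(lines[-80:])
--     head = lines[best:][:120]
--     for k, line in enumerate(head):
--         if line.startswith("FAILED "):
--             return "\n".join(head[:k + 1])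
--     return "\n".join(head)
-- ===== Notes on version B (the rewrite author's own statement) =====
-- stated objective: alternative
-- what changed: B inverts the loop nesting and removes the accumulator state machine: it scans token-major (for each failing test name its first line index, folding a running minimum and pruning each scan at the current minimum) instead of A's line-major any()-scan with a capture flag, then materialises the window as a pure slice lines[best:][:120] truncated after the first 'FAILED ' line instead of appending line by line with in-loop breaks; correctness rests on the minimum of per-token first hits equalling the first line hit by any token.
import Mathlib
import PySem

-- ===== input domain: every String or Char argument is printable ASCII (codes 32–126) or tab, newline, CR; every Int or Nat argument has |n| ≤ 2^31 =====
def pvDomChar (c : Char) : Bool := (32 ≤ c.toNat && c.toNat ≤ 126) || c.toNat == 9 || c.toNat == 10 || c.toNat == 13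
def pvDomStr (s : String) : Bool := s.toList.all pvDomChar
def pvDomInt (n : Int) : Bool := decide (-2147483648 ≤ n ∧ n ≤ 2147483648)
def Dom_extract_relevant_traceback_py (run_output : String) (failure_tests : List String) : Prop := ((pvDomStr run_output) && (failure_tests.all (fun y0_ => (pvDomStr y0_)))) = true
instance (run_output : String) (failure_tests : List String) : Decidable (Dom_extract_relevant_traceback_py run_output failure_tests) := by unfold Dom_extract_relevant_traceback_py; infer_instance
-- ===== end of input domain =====

-- B replaces A's line-major capture-flag state machine by a token-major minimum-index
-- search plus a pure slice of the window; same return value everywhere (objective: alternative).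

-- ===== PORT A =====
-- 'any(test_name in line for test_name in wanted)' (order-independent, so exact on a set)
def pvWantedHit (wanted : PySem.Set String) (line : String) : Bool :=
  wanted.any (fun test_name => PySem.Str.isIn test_name line)

-- A's for-loop: state = (captured, capture); each 'break' returns captured.
def pvLoopA (wanted : PySem.Set String) : List String → List String → Bool → List String
  | [], captured, _ => captured
  | line :: rest, captured, capture =>
    let capture' := capture || pvWantedHit wanted line
    let captured' := if capture' then captured ++ [line] else captured
    if capture' && PySem.Str.startswith line "FAILED " && !captured'.isEmpty then captured'
    else if 120 ≤ captured'.length then captured'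
    else pvLoopA wanted rest captured' capture'

def extract_relevant_traceback_py (run_output : String) (failure_tests : List String) : String :=
  if run_output = "" then ""
  else
    let lines := PySem.Str.splitlines run_output
    let wanted : PySem.Set String := PySem.Set.ofList failure_tests
    if wanted = [] then PySem.Str.join "\n" (PySem.List.slice lines (some (-80)) none)
    else
      let captured := pvLoopA wanted lines [] false
      PySem.Str.join "\n" (if captured = [] then PySem.List.slice lines (some (-80)) none else captured)

-- ===== PORT B =====
-- inner loop: 'for i in range(limit): if t in lines[i]: best = i; break'
def pvScanTokLim (t : String) : List String → Nat → Option Nat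
  | _, 0 => none
  | [], _ + 1 => none
  | line :: rest, k + 1 =>
    if PySem.Str.isIn t line then some 0 else (pvScanTokLim t rest k).map (· + 1)

-- outer loop over the token set; each scan is pruned at the current minimum
def pvBestLoopL (lines : List String) : List String → Option Nat → Option Nat
  | [], best => best
  | t :: ts, best =>
    let limit := match best with | none => lines.length | some b => b
    pvBestLoopL lines ts
      (match pvScanTokLim t lines limit with | none => best | some i => some i)

-- 'for k, line in enumerate(head): if line.startswith("FAILED "): …'
def pvScanFailed : List String → Option Nat
  | [] => none
  | line :: rest =>
    if PySem.Str.startswith line "FAILED " then some 0 else (pvScanFailed rest).map (· + 1)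

def extract_relevant_traceback_py_alt (run_output : String) (failure_tests : List String) : String :=
  let lines := PySem.Str.splitlines run_output
  match pvBestLoopL lines (PySem.Set.ofList failure_tests) none with
  | none => PySem.Str.join "\n" (PySem.List.slice lines (some (-80)) none)
  | some best =>
    let head := PySem.List.slice (PySem.List.slice lines (some (best : Int)) none) none (some 120)
    match pvScanFailed head with
    | some k => PySem.Str.join "\n" (PySem.List.slice head none (some ((k : Int) + 1)))
    | none => PySem.Str.join "\n" head

-- ===== PRECONDITION & SPEC =====
def Spec_extract_relevant_traceback_py (run_output : String) (failure_tests : List String) (out : String) : Prop := out = extract_relevant_traceback_py_alt run_output failure_tests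
instance (run_output : String) (failure_tests : List String) (out : String) : Decidable (Spec_extract_relevant_traceback_py run_output failure_tests out) := by unfold Spec_extract_relevant_traceback_py; infer_instance

-- ===== CLAIM =====
def Claim_equal_extract_relevant_traceback_py : Prop := ∀ (run_output : String) (failure_tests : List String), Dom_extract_relevant_traceback_py run_output failure_tests → Spec_extract_relevant_traceback_py run_output failure_tests (extract_relevant_traceback_py run_output failure_tests)

-- ===== LEMMAS AND PROOFS =====

-- ---- anchor side: min over tokens of first hit = first line hit by any token ----

-- min of two optional indices (proof-side view of the running-minimum update)
def pvOmin (a b : Option Nat) : Option Nat :=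
  match a, b with
  | none, x => x
  | some a, none => some a
  | some a, some b => some (min a b)

-- unlimited per-token scan and fold (proof-only characterisation of the pruned loop)
def pvScanTok (t : String) : List String → Option Nat
  | [] => none
  | line :: rest => if PySem.Str.isIn t line then some 0 else (pvScanTok t rest).map (· + 1)

def pvBestLoop (lines : List String) : List String → Option Nat → Option Nat
  | [], best => best
  | t :: ts, best => pvBestLoop lines ts (pvOmin best (pvScanTok t lines))

theorem pvScanTok_lt_length (t : String) :
    ∀ (ls : List String) (i : Nat), pvScanTok t ls = some i → i < ls.length := by
  intro ls
  induction ls with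
  | nil => intro i h; simp [pvScanTok] at h
  | cons line rest ih =>
    intro i h
    simp only [pvScanTok] at h
    split_ifs at h with hc
    · cases h; simp
    · cases hj : pvScanTok t rest with
      | none => rw [hj] at h; simp at h
      | some j =>
        rw [hj] at h
        simp at h
        have := ih j hj
        simp [List.length_cons]
        omega

theorem pvScanTokLim_eq (t : String) :
    ∀ (ls : List String) (k : Nat),
      pvScanTokLim t ls k =
        (match pvScanTok t ls with
         | some i => if i < k then some i else none
         | none => none) := by
  intro ls
  induction ls with
  | nil => intro k; cases k <;> simp [pvScanTokLim, pvScanTok]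
  | cons line rest ih =>
    intro k
    cases k with
    | zero =>
      simp only [pvScanTokLim, pvScanTok]
      split_ifs with hc
      · simp
      · cases h : pvScanTok t rest <;> simp
    | succ m =>
      simp only [pvScanTokLim, pvScanTok]
      split_ifs with hc
      · simp
      · rw [ih m]
        cases h : pvScanTok t rest with
        | none => simp
        | some j =>
          by_cases hj : j < m
          · simp [hj, show j + 1 < m + 1 by omega]
          · simp [hj, show ¬ (j + 1 < m + 1) by omega]

theorem pvBestLoopL_eq_pvBestLoop (lines : List String) :
    ∀ (ts : List String) (best : Option Nat),
      pvBestLoopL lines ts best = pvBestLoop lines ts best := by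
  intro ts
  induction ts with
  | nil => intro best; rfl
  | cons t ts ih =>
    intro best
    simp only [pvBestLoopL, pvBestLoop]
    rw [ih]
    congr 1
    cases best with
    | none =>
      rw [pvScanTokLim_eq]
      cases h : pvScanTok t lines with
      | none => rfl
      | some i => simp [pvScanTok_lt_length t lines i h, pvOmin]
    | some b =>
      rw [pvScanTokLim_eq]
      cases h : pvScanTok t lines with
      | none => rfl
      | some i =>
        by_cases hb : i < b
        · simp [hb, pvOmin, Nat.min_eq_right (by omega : i ≤ b)]
        · simp [hb, pvOmin, Nat.min_eq_left (by omega : b ≤ i)]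

theorem pvOmin_none_right (a : Option Nat) : pvOmin a none = a := by cases a <;> rfl

theorem pvOmin_assoc (a b c : Option Nat) : pvOmin (pvOmin a b) c = pvOmin a (pvOmin b c) := by
  cases a <;> cases b <;> cases c <;> simp [pvOmin, Nat.min_assoc]

theorem pvBestLoop_acc (lines : List String) :
    ∀ (ts : List String) (best : Option Nat),
      pvBestLoop lines ts best = pvOmin best (pvBestLoop lines ts none) := by
  intro ts
  induction ts with
  | nil => intro best; simp [pvBestLoop, pvOmin_none_right]
  | cons t ts ih =>
    intro best
    simp only [pvBestLoop]
    rw [ih (pvOmin best (pvScanTok t lines)), ih (pvOmin none (pvScanTok t lines))]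
    rw [show pvOmin none (pvScanTok t lines) = pvScanTok t lines from rfl, pvOmin_assoc]

theorem pvBestLoop_cons_law (lines : List String) (t : String) (ts : List String) :
    pvBestLoop lines (t :: ts) none = pvOmin (pvScanTok t lines) (pvBestLoop lines ts none) := by
  show pvBestLoop lines ts (pvOmin none (pvScanTok t lines)) = _
  rw [show pvOmin none (pvScanTok t lines) = pvScanTok t lines from rfl, pvBestLoop_acc]

theorem pvOmin_map_succ_zero (x : Option Nat) : pvOmin (x.map (· + 1)) (some 0) = some 0 := by
  cases x <;> simp [pvOmin]

theorem pvOmin_some_zero (x : Option Nat) : pvOmin (some 0) x = some 0 := by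
  cases x <;> simp [pvOmin]

theorem pvOmin_map_succ (x y : Option Nat) :
    pvOmin (x.map (· + 1)) (y.map (· + 1)) = (pvOmin x y).map (· + 1) := by
  cases x <;> cases y <;> simp [pvOmin, Nat.succ_min_succ]

theorem pvBestLoop_nil : ∀ (ts : List String), pvBestLoop [] ts none = none := by
  intro ts
  induction ts with
  | nil => rfl
  | cons t ts ih => simp [pvBestLoop, pvScanTok, pvOmin, ih]

theorem pvBestLoop_cons (line : String) (rest : List String) :
    ∀ (ws : List String),
      pvBestLoop (line :: rest) ws none =
        if ws.any (fun t => PySem.Str.isIn t line) then some 0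
        else (pvBestLoop rest ws none).map (· + 1) := by
  intro ws
  induction ws with
  | nil => simp [pvBestLoop]
  | cons t ts ih =>
    rw [pvBestLoop_cons_law, ih, pvBestLoop_cons_law]
    simp only [pvScanTok, List.any_cons]
    by_cases h : PySem.Str.isIn t line = true
    · simp only [h, Bool.true_or]
      rw [if_pos trivial, if_pos trivial]
      exact pvOmin_some_zero _
    · have h' : PySem.Str.isIn t line = false := by simpa using h
      simp only [h', Bool.false_or, Bool.false_eq_true, if_false]
      by_cases hany : (ts.any fun t => PySem.Str.isIn t line) = true
      · rw [if_pos hany, if_pos hany]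
        exact pvOmin_map_succ_zero _
      · rw [if_neg hany, if_neg hany]
        exact pvOmin_map_succ _ _

theorem pvBestLoop_eq_findIdx? (ws : PySem.Set String) :
    ∀ (lines : List String), pvBestLoop lines ws none = lines.findIdx? (pvWantedHit ws) := by
  intro lines
  induction lines with
  | nil => rw [pvBestLoop_nil]; rfl
  | cons line rest ih =>
    rw [pvBestLoop_cons, ih, List.findIdx?_cons]
    rfl

-- ---- window side: A's collecting loop = take-120 window cut at the first FAILED line ----

-- B-free characterisation of A's loop once the flag is set (proof helper only).
def pvCollect : List String → List String → List String
  | [], captured => captured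
  | line :: rest, captured =>
    let captured' := captured ++ [line]
    if PySem.Str.startswith line "FAILED " then captured'
    else if 120 ≤ captured'.length then captured'
    else pvCollect rest captured'

theorem pvLoopA_true (wanted : PySem.Set String) :
    ∀ (ls captured : List String), pvLoopA wanted ls captured true = pvCollect ls captured := by
  intro ls
  induction ls with
  | nil => intro captured; rfl
  | cons line rest ih =>
    intro captured
    have hne : (captured ++ [line]).isEmpty = false := by simp
    simp only [pvLoopA, pvCollect]
    simp [hne]
    split_ifs <;> first | rfl | exact ih _

theorem pvLoopA_false (wanted : PySem.Set String) :
    ∀ (ls : List String),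
      pvLoopA wanted ls [] false =
        (match ls.findIdx? (pvWantedHit wanted) with
         | none => []
         | some i => pvCollect (ls.drop i) []) := by
  intro ls
  induction ls with
  | nil => rfl
  | cons line rest ih =>
    by_cases hm : pvWantedHit wanted line = true
    · have key : pvLoopA wanted (line :: rest) [] false = pvCollect (line :: rest) [] := by
        simp only [pvLoopA, pvCollect]
        simp [hm]
        split_ifs <;> first | rfl | exact pvLoopA_true wanted rest _
      rw [List.findIdx?_cons, if_pos hm]
      simpa using key
    · have hm' : pvWantedHit wanted line = false := by simpa using hm
      rw [List.findIdx?_cons, if_neg (by simp [hm'])]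
      simp only [pvLoopA]
      simp [hm']
      rw [ih]
      cases h : rest.findIdx? (pvWantedHit wanted) <;> simp

-- budget-indexed window (proof helper)
def pvG : Nat → List String → List String
  | _, [] => []
  | n, line :: rest =>
    line :: (if PySem.Str.startswith line "FAILED " then []
             else if n ≤ 1 then [] else pvG (n - 1) rest)

theorem pvCollect_eq_pvG :
    ∀ (ls captured : List String), captured.length < 120 →
      pvCollect ls captured = captured ++ pvG (120 - captured.length) ls := by
  intro ls
  induction ls with
  | nil => intro captured _; simp [pvCollect, pvG]
  | cons line rest ih =>
    intro captured hlt
    have hl1 : (captured ++ [line]).length = captured.length + 1 := by simp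
    simp only [pvCollect, pvG]
    by_cases hf : PySem.Str.startswith line "FAILED " = true
    · rw [if_pos hf, if_pos hf]
    · rw [if_neg hf, if_neg hf]
      by_cases hc : 120 ≤ (captured ++ [line]).length
      · have h119 : captured.length = 119 := by omega
        rw [if_pos hc, if_pos (show 120 - captured.length ≤ 1 by omega)]
      · have hc' : ¬ 120 ≤ captured.length + 1 := by omega
        rw [if_neg hc, ih (captured ++ [line]) (by omega), hl1,
          if_neg (show ¬ (120 - captured.length ≤ 1) by omega),
          show 120 - (captured.length + 1) = 120 - captured.length - 1 from by omega]
        simp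

theorem pvG_eq_take :
    ∀ (ls : List String) (n : Nat), 1 ≤ n →
      pvG n ls =
        (match pvScanFailed (ls.take n) with
         | some k => (ls.take n).take (k + 1)
         | none => ls.take n) := by
  intro ls
  induction ls with
  | nil => intro n _; simp [pvG, pvScanFailed]
  | cons line rest ih =>
    intro n hn
    obtain ⟨m, rfl⟩ : ∃ m, n = m + 1 := ⟨n - 1, by omega⟩
    simp only [pvG, List.take_succ_cons, pvScanFailed]
    by_cases hf : PySem.Str.startswith line "FAILED " = true
    · rw [if_pos hf, if_pos hf]
      simp
    · rw [if_neg hf, if_neg hf]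
      by_cases hm : m = 0
      · subst hm
        simp [pvScanFailed]
      · rw [if_neg (show ¬ (m + 1 ≤ 1) by omega)]
        simp only [Nat.add_sub_cancel]
        rw [ih m (by omega)]
        cases h : pvScanFailed (rest.take m) <;> simp

-- pvCollect never returns [] on a nonempty list
theorem pvCollect_acc_ne_nil : ∀ (ls captured : List String), captured ≠ [] → pvCollect ls captured ≠ [] := by
  intro ls
  induction ls with
  | nil => intro captured h; exact h
  | cons line rest ih =>
    intro captured _
    simp only [pvCollect]
    split_ifs with h1 h2
    · simp
    · simp
    · exact ih _ (by simp)

theorem pvCollect_ne_nil (ls : List String) (h : ls ≠ []) : pvCollect ls [] ≠ [] := by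
  cases ls with
  | nil => exact absurd rfl h
  | cons line rest =>
    simp only [pvCollect]
    split_ifs with h1 h2
    · simp
    · simp
    · exact pvCollect_acc_ne_nil _ _ (by simp)

-- ===== VERDICT =====
theorem extract_relevant_traceback_py_spec : Claim_equal_extract_relevant_traceback_py := by
  intro run_output failure_tests _
  unfold Spec_extract_relevant_traceback_py
  simp only [extract_relevant_traceback_py, extract_relevant_traceback_py_alt]
  rw [pvBestLoopL_eq_pvBestLoop, pvBestLoop_eq_findIdx?]
  by_cases hempty : run_output = ""
  · subst hempty
    rw [if_pos rfl]
    have h0 : PySem.Str.splitlines "" = [] := by decide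
    rw [h0]
    simp only [List.findIdx?_nil]
    decide
  · rw [if_neg hempty]
    by_cases hw : PySem.Set.ofList failure_tests = []
    · have hnone : (PySem.Str.splitlines run_output).findIdx?
          (pvWantedHit (PySem.Set.ofList failure_tests)) = none := by
        rw [List.findIdx?_eq_none_iff]; intro x _; simp [pvWantedHit, hw]
      rw [if_pos hw, hnone]
    · rw [if_neg hw, pvLoopA_false]
      cases h : (PySem.Str.splitlines run_output).findIdx?
          (pvWantedHit (PySem.Set.ofList failure_tests)) with
      | none => rfl
      | some i =>
        have hi : i < (PySem.Str.splitlines run_output).length :=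
          (List.findIdx?_eq_some_iff_findIdx_eq.mp h).1
        have hdrop : (PySem.Str.splitlines run_output).drop i ≠ [] := by
          intro hc; rw [List.drop_eq_nil_iff] at hc; omega
        rw [if_neg (pvCollect_ne_nil _ hdrop)]
        dsimp only
        rw [PySem.List.slice_from_natCast,
            show (some (120 : Int)) = some (((120 : Nat) : Int)) by norm_num,
            PySem.List.slice_to_natCast]
        rw [pvCollect_eq_pvG _ [] (by simp)]
        simp only [List.nil_append, List.length_nil, Nat.sub_zero]
        rw [pvG_eq_take _ 120 (by omega)]
        cases hs : pvScanFailed (((PySem.Str.splitlines run_output).drop i).take 120) with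
        | none => rfl
        | some k =>
          dsimp only
          have : ((k : Int) + 1) = ((k + 1 : Nat) : Int) := by push_cast; ring
          rw [this, PySem.List.slice_to_natCast]
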